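-- pv_equiv track=rewrite | github.com/SunA0202/MS_AI_AIDBTUNE | menu2.py | extract_sql_statement
-- ===== SOURCE A (Python) =====
-- def extract_sql_statement(s):
--     keywords = ["SELECT", "INSERT", "DELETE", "UPDATE"]
--     positions = []
--
--     # 각 키워드가 등장하는 인덱스 저장
--     for kw in keywords:
--         idx = s.upper().find(kw)
--         if idx != -1:
--             positions.append(idx)
--
--     # 키워드가 하나도 없으면 원본 반환
--     if not positions:
--         return s
--
--     # 가장 앞에 등장하는 키워드의 위치
--     first_idx = min(positions)
--     return s[first_idx:].lstrip()
-- ===== SOURCE B (Python) =====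
-- def extract_sql_statement(s):
--     u = s.upper()
--     for i in range(len(u)):
--         if u.startswith(("SELECT", "INSERT", "DELETE", "UPDATE"), i):
--             return s[i:].lstrip()
--     return s
-- ===== Notes on version B (the rewrite author's own statement) =====
-- stated objective: idiomatic
-- what changed: Single left-to-right scan that stops at the first position where any of the four keywords starts (str.startswith with a tuple), instead of four separate find() passes collecting a positions list and taking min().
import Mathlib
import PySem

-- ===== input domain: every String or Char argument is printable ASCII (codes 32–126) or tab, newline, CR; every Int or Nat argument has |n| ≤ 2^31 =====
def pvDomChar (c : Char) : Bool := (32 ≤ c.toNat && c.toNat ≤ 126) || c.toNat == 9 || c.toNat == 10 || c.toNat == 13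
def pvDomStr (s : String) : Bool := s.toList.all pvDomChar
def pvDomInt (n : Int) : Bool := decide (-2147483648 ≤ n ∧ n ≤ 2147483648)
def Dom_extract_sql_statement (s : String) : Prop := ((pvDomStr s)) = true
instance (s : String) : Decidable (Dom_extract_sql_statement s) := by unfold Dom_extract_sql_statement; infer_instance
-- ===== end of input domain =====

-- B replaces A's four find() passes + positions list + min() by one left-to-right scan
-- that stops at the first position where any keyword starts (objective: idiomatic).

-- ===== PORT A =====
def extract_sql_statement (s : String) : String :=
  let keywords : List String := ["SELECT", "INSERT", "DELETE", "UPDATE"]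
  let positions : List Int :=
    keywords.foldl (fun acc kw =>
      let idx := PySem.Str.find (PySem.Str.upper s) kw
      if idx ≠ -1 then acc ++ [idx] else acc) []
  if positions = [] then s
  else
    match PySem.List.min? positions (fun x => x) with
    | none => s   -- unreachable: positions ≠ [] here (totality guard only)
    | some firstIdx => PySem.Str.lstrip (PySem.Str.slice s (some firstIdx) none)

-- ===== PORT B =====
-- u.startswith(("SELECT", "INSERT", "DELETE", "UPDATE"), i)
def pvKwHit (l : List Char) : Bool :=
  ["SELECT".toList, "INSERT".toList, "DELETE".toList, "UPDATE".toList].any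
    (fun kw => kw.isPrefixOf l)

-- the 'for i in range(len(u))' scan, as structural recursion on the suffix
def pvScanKw : List Char → Option Nat
  | [] => none
  | c :: t => if pvKwHit (c :: t) then some 0 else (pvScanKw t).map (· + 1)

def extract_sql_statement_alt (s : String) : String :=
  match pvScanKw (PySem.Str.upper s).toList with
  | some i => PySem.Str.lstrip (PySem.Str.slice s (some (i : Int)) none)
  | none => s

-- ===== PRECONDITION & SPEC =====
def Spec_extract_sql_statement (s : String) (out : String) : Prop := out = extract_sql_statement_alt s
instance (s : String) (out : String) : Decidable (Spec_extract_sql_statement s out) := by unfold Spec_extract_sql_statement; infer_instance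

-- ===== CLAIM (what is proved, stated in full; the proofs are below) =====
def Claim_equal_extract_sql_statement : Prop := ∀ (s : String), Dom_extract_sql_statement s → Spec_extract_sql_statement s (extract_sql_statement s)

-- ===== LEMMAS AND PROOFS =====

lemma pvKwHit_nil : pvKwHit [] = false := by decide

-- hitting ↔ some keyword (as a char list) is a prefix
lemma pvKwHit_iff (l : List Char) :
    pvKwHit l = true ↔ ∃ kw ∈ ["SELECT", "INSERT", "DELETE", "UPDATE"], kw.toList <+: l := by
  simp only [pvKwHit, List.any_eq_true, List.isPrefixOf_iff_prefix, List.mem_cons,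
    List.not_mem_nil, or_false]
  constructor
  · rintro ⟨kw, (rfl | rfl | rfl | rfl), hp⟩
    · exact ⟨"SELECT", by simp, hp⟩
    · exact ⟨"INSERT", by simp, hp⟩
    · exact ⟨"DELETE", by simp, hp⟩
    · exact ⟨"UPDATE", by simp, hp⟩
  · rintro ⟨kw, (rfl | rfl | rfl | rfl), hp⟩
    · exact ⟨"SELECT".toList, by simp, hp⟩
    · exact ⟨"INSERT".toList, by simp, hp⟩
    · exact ⟨"DELETE".toList, by simp, hp⟩
    · exact ⟨"UPDATE".toList, by simp, hp⟩

lemma pvScanKw_none (l : List Char) :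
    pvScanKw l = none ↔ ∀ n : Nat, pvKwHit (l.drop n) = false := by
  induction l with
  | nil => simp [pvScanKw, pvKwHit_nil]
  | cons c t ih =>
    simp only [pvScanKw]
    by_cases h : pvKwHit (c :: t) = true
    · rw [if_pos h]
      constructor
      · intro hc; exact absurd hc (by simp)
      · intro hall
        have := hall 0
        rw [List.drop_zero, h] at this
        cases this
    · have hf : pvKwHit (c :: t) = false := by simpa using h
      rw [if_neg h]
      simp only [Option.map_eq_none_iff, ih]
      constructor
      · intro hall n
        cases n with
        | zero => simpa using hf
        | succ k => simpa [List.drop_succ_cons] using hall k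
      · intro hall n
        simpa [List.drop_succ_cons] using hall (n + 1)

lemma pvScanKw_some (l : List Char) (n : Nat) :
    pvScanKw l = some n ↔
      pvKwHit (l.drop n) = true ∧ ∀ m : Nat, m < n → pvKwHit (l.drop m) = false := by
  induction l generalizing n with
  | nil =>
    simp only [pvScanKw]
    constructor
    · intro h; cases h
    · rintro ⟨h1, -⟩
      rw [List.drop_nil, pvKwHit_nil] at h1
      cases h1
  | cons c t ih =>
    simp only [pvScanKw]
    by_cases h : pvKwHit (c :: t) = true
    · rw [if_pos h]
      constructor
      · intro hn
        injection hn with hn'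
        subst hn'
        exact ⟨by simpa using h, fun m hm => absurd hm (Nat.not_lt_zero m)⟩
      · rintro ⟨-, hmin⟩
        cases n with
        | zero => rfl
        | succ k =>
          have h0 := hmin 0 (Nat.succ_pos k)
          rw [List.drop_zero] at h0
          rw [h0] at h
          cases h
    · have hf : pvKwHit (c :: t) = false := by simpa using h
      rw [if_neg h]
      cases n with
      | zero =>
        constructor
        · intro hz
          obtain ⟨j, hj, hjk⟩ := Option.map_eq_some_iff.mp hz
          omega
        · rintro ⟨h1, -⟩
          rw [List.drop_zero, hf] at h1
          cases h1
      | succ k =>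
        rw [Option.map_eq_some_iff]
        constructor
        · rintro ⟨j, hj, hjk⟩
          obtain rfl : j = k := by omega
          obtain ⟨h1, h2⟩ := (ih j).mp hj
          refine ⟨by simpa [List.drop_succ_cons] using h1, fun m hm => ?_⟩
          cases m with
          | zero => simpa using hf
          | succ p => simpa [List.drop_succ_cons] using h2 p (by omega)
        · rintro ⟨h1, h2⟩
          refine ⟨k, (ih k).mpr ⟨by simpa [List.drop_succ_cons] using h1, fun p hp => ?_⟩, rfl⟩
          simpa [List.drop_succ_cons] using h2 (p + 1) (by omega)

-- membership in A's positions-building fold, generically over the keyword list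
lemma foldl_pos_mem (f : String → Int) (ks : List String) (acc : List Int) (x : Int) :
    x ∈ ks.foldl (fun acc kw => let idx := f kw; if idx ≠ -1 then acc ++ [idx] else acc) acc ↔
      x ∈ acc ∨ ∃ kw ∈ ks, f kw = x ∧ x ≠ -1 := by
  induction ks generalizing acc with
  | nil => simp
  | cons k t ih =>
    simp only [List.foldl_cons]
    by_cases h : f k ≠ -1
    · rw [if_pos h, ih]
      simp only [List.mem_append, List.mem_cons, List.not_mem_nil, or_false]
      constructor
      · rintro ((hx | hx) | ⟨kw, hkw, hfx, hne⟩)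
        · exact Or.inl hx
        · exact Or.inr ⟨k, Or.inl rfl, hx.symm, hx ▸ h⟩
        · exact Or.inr ⟨kw, Or.inr hkw, hfx, hne⟩
      · rintro (hx | ⟨kw, (rfl | hkw), hfx, hne⟩)
        · exact Or.inl (Or.inl hx)
        · exact Or.inl (Or.inr hfx.symm)
        · exact Or.inr ⟨kw, hkw, hfx, hne⟩
    · rw [if_neg h, ih]
      simp only [not_not] at h
      simp only [List.mem_cons]
      constructor
      · rintro (hx | ⟨kw, hkw, hfx, hne⟩)
        · exact Or.inl hx
        · exact Or.inr ⟨kw, Or.inr hkw, hfx, hne⟩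
      · rintro (hx | ⟨kw, (rfl | hkw), hfx, hne⟩)
        · exact Or.inl hx
        · exact absurd (hfx ▸ h) hne
        · exact Or.inr ⟨kw, hkw, hfx, hne⟩

lemma foldl_pos_nil (f : String → Int) (ks : List String) :
    ks.foldl (fun acc kw => let idx := f kw; if idx ≠ -1 then acc ++ [idx] else acc) [] = [] ↔
      ∀ kw ∈ ks, f kw = -1 := by
  constructor
  · intro h kw hkw
    by_contra hne
    have hmem : f kw ∈ ([] : List Int) := by
      rw [← h, foldl_pos_mem]
      exact Or.inr ⟨kw, hkw, rfl, hne⟩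
    simp at hmem
  · intro h
    induction ks with
    | nil => rfl
    | cons k t ih =>
      simp only [List.foldl_cons]
      rw [if_neg (by simpa using h k List.mem_cons_self)]
      exact ih (fun kw hkw => h kw (List.mem_cons_of_mem _ hkw))

-- a keyword prefix at some drop position means find ≠ -1
lemma find_ne_neg_one_of_prefix_drop (u kw : List Char) (j : Nat) (h : kw <+: u.drop j) :
    PySem.Chars.find u kw ≠ -1 := by
  rw [Ne, PySem.Chars.find_eq_neg_one_iff, not_not, ← PySem.Chars.isIn_iff_infix,
    ← PySem.Chars.exists_prefix_drop_iff_isIn]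
  exact ⟨j, h⟩

-- find's defining property, at start 0
lemma find_spec (u kw : List Char) (h : PySem.Chars.find u kw ≠ -1) :
    kw <+: u.drop (PySem.Chars.find u kw).toNat ∧
      ∀ i : Nat, i < (PySem.Chars.find u kw).toNat → ¬ kw <+: u.drop i := by
  have h0 : (0 : Nat) ≤ u.length := Nat.zero_le _
  have hs := PySem.Chars.findFrom_natCast_spec u kw 0 h0
  rw [Nat.cast_zero, PySem.Chars.findFrom_zero] at hs
  obtain ⟨-, h2, h3⟩ := hs h
  exact ⟨h2, fun i hi => h3 i (Nat.zero_le i) hi⟩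

-- ===== VERDICT (by name: the statement is the Claim_ definition above) =====
theorem extract_sql_statement_spec : Claim_equal_extract_sql_statement := by
  intro s _
  unfold Spec_extract_sql_statement
  simp only [extract_sql_statement, extract_sql_statement_alt, PySem.Str.find_eq]
  set u := (PySem.Str.upper s).toList with hu
  set positions : List Int :=
    (["SELECT", "INSERT", "DELETE", "UPDATE"] : List String).foldl
      (fun acc kw =>
        let idx := PySem.Chars.find u kw.toList
        if idx ≠ -1 then acc ++ [idx] else acc) [] with hpos
  by_cases hempty : positions = []
  · -- no keyword occurs: both return s
    have hall : ∀ kw ∈ (["SELECT", "INSERT", "DELETE", "UPDATE"] : List String),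
        PySem.Chars.find u kw.toList = -1 :=
      (foldl_pos_nil (fun kw => PySem.Chars.find u kw.toList) _).mp hempty
    have hscan : pvScanKw u = none := by
      rw [pvScanKw_none]
      intro n
      by_contra hbad
      rw [Bool.not_eq_false, pvKwHit_iff] at hbad
      obtain ⟨kw, hkw, hpre⟩ := hbad
      exact find_ne_neg_one_of_prefix_drop u kw.toList n hpre (hall kw hkw)
    rw [if_pos hempty, hscan]
  · -- some keyword occurs
    obtain ⟨m, hmin⟩ : ∃ m, PySem.List.min? positions (fun x => x) = some m := by
      cases hm : PySem.List.min? positions (fun x => x) with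
      | none => exact absurd ((PySem.List.min?_eq_none_iff _ _).mp hm) hempty
      | some m => exact ⟨m, rfl⟩
    have hmem := PySem.List.min?_mem hmin
    have hmin_le : ∀ y ∈ positions, m ≤ y := PySem.List.min?_isMin hmin
    obtain ⟨kw0, hkw0, hfkw0, hmne⟩ :
        ∃ kw ∈ (["SELECT", "INSERT", "DELETE", "UPDATE"] : List String),
          PySem.Chars.find u kw.toList = m ∧ m ≠ -1 := by
      rw [hpos] at hmem
      have hm' := (foldl_pos_mem (fun kw => PySem.Chars.find u kw.toList)
        ["SELECT", "INSERT", "DELETE", "UPDATE"] [] m).mp hmem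
      simpa using hm'
    have hm0 : 0 ≤ m := by
      have := PySem.Chars.neg_one_le_find u kw0.toList
      omega
    obtain ⟨hpre0, hmin0⟩ := find_spec u kw0.toList (by rw [hfkw0]; exact hmne)
    rw [hfkw0] at hpre0 hmin0
    have hscan : pvScanKw u = some m.toNat := by
      rw [pvScanKw_some]
      constructor
      · rw [pvKwHit_iff]; exact ⟨kw0, hkw0, hpre0⟩
      · intro j hj
        by_contra hbad
        rw [Bool.not_eq_false, pvKwHit_iff] at hbad
        obtain ⟨kw, hkw, hpre⟩ := hbad
        have hne : PySem.Chars.find u kw.toList ≠ -1 :=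
          find_ne_neg_one_of_prefix_drop u kw.toList j hpre
        have hmemk : PySem.Chars.find u kw.toList ∈ positions := by
          rw [hpos, foldl_pos_mem]
          exact Or.inr ⟨kw, hkw, rfl, hne⟩
        have hle : m ≤ PySem.Chars.find u kw.toList := hmin_le _ hmemk
        obtain ⟨-, hminK⟩ := find_spec u kw.toList hne
        exact hminK j (by omega) hpre
    rw [if_neg hempty, hmin, hscan]
    show PySem.Str.lstrip (PySem.Str.slice s (some m) none) =
      PySem.Str.lstrip (PySem.Str.slice s (some ((m.toNat : Int))) none)
    rw [Int.toNat_of_nonneg hm0]
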